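-- pv_equiv track=rewrite | github.com/vineetred/aesDES | test.py | columnBreak
-- ===== SOURCE A (Python) =====
-- def columnBreak(test):
--     c = []
--     letters = []
--     k =0
--     for j in range(0,4):
--         for i in range(0,4):
--             letters.append(test[(8*i)+k:(8*i)+2+k])
--         k+=2
--         c.append(letters)
--         letters = []
--     return c
-- ===== SOURCE B (Python) =====
-- def columnBreak(test):
--     rows = [[], [], [], []]
--     s = test
--     for n in range(16):
--         rows[n % 4].append(s[:2])
--         s = s[2:]
--     return rows
-- ===== Notes on version B (the rewrite author's own statement) =====
-- stated objective: alternative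
-- what changed: Replaces A's nested row-by-row loops with offset arithmetic 8*i+k by a single flat pass that peels the string two characters at a time and distributes each chunk round-robin (n % 4) into four accumulator rows.
import Mathlib
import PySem

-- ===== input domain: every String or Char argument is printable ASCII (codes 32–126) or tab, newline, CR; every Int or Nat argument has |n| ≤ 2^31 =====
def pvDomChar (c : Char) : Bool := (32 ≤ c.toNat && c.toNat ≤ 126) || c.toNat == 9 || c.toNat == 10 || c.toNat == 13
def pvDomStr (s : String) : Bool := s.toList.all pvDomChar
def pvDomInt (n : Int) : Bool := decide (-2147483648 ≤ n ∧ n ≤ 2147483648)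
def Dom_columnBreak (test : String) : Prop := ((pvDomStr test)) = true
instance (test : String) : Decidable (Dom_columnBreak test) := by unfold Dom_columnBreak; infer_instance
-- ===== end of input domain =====

-- header: B replaces A's nested offset-arithmetic loops by one flat pass that peels the string
-- two characters at a time and distributes each chunk round-robin into four rows (objective: alternative).


-- ===== PORT A =====
-- literal transliteration: outer loop over j with state (c, k), inner loop appending slices to letters
def columnBreak (test : String) : List (List String) :=
  (((PySem.List.pyRange 0 4 1).foldl
      (fun (st : List (List String) × Int) (_j : Int) =>
        let letters := (PySem.List.pyRange 0 4 1).foldl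
          (fun (ls : List String) (i : Int) =>
            ls ++ [PySem.Str.slice test (some (8 * i + st.2)) (some (8 * i + 2 + st.2))]) []
        (st.1 ++ [letters], st.2 + 2))
      ([], 0))).1

-- ===== PORT B =====
-- appendAt rows i x = rows with x appended to rows[i] (Python's rows[i].append(x))
def appendAt : List (List String) → Nat → String → List (List String)
  | [], _, _ => []
  | r :: rs, 0, x => (r ++ [x]) :: rs
  | r :: rs, n+1, x => r :: appendAt rs n x

-- one flat pass: peel off the first two characters, append them to row n % 4
def columnBreak_alt (test : String) : List (List String) :=
  (((PySem.List.pyRange 0 16 1).foldl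
      (fun (st : List (List String) × String) (n : Int) =>
        (appendAt st.1 (PySem.Int.mod n 4).toNat (PySem.Str.slice st.2 none (some 2)),
         PySem.Str.slice st.2 (some 2) none))
      ([[], [], [], []], test))).1

-- ===== PRECONDITION & SPEC =====
def Spec_columnBreak (test : String) (out : List (List String)) : Prop := out = columnBreak_alt test
instance (test : String) (out : List (List String)) : Decidable (Spec_columnBreak test out) := by unfold Spec_columnBreak; infer_instance

-- ===== CLAIM =====
def Claim_equal_columnBreak : Prop := ∀ (test : String), Dom_columnBreak test → Spec_columnBreak test (columnBreak test)

-- ===== LEMMAS AND PROOFS =====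

-- ===== VERDICT =====
set_option maxHeartbeats 1600000 in
theorem columnBreak_spec : Claim_equal_columnBreak := by
  intro test _
  show columnBreak test = columnBreak_alt test
  simp only [columnBreak, columnBreak_alt,
    show PySem.List.pyRange 0 4 1 = [0, 1, 2, 3] from by decide,
    show PySem.List.pyRange 0 16 1 = [0,1,2,3,4,5,6,7,8,9,10,11,12,13,14,15] from by decide,
    List.foldl]
  norm_num [PySem.Str.slice, pysem, PySem.Int.mod, Int.fmod, appendAt,
    show ((0 : Int)).toNat = 0 from rfl,
    show ((1 : Int)).toNat = 1 from rfl,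
    show ((2 : Int)).toNat = 2 from rfl,
    show ((3 : Int)).toNat = 3 from rfl,
    show ((4 : Int)).toNat = 4 from rfl,
    show ((6 : Int)).toNat = 6 from rfl,
    show ((8 : Int)).toNat = 8 from rfl,
    show ((10 : Int)).toNat = 10 from rfl,
    show ((12 : Int)).toNat = 12 from rfl,
    show ((14 : Int)).toNat = 14 from rfl,
    show ((16 : Int)).toNat = 16 from rfl,
    show ((18 : Int)).toNat = 18 from rfl,
    show ((20 : Int)).toNat = 20 from rfl,
    show ((22 : Int)).toNat = 22 from rfl,
    show ((24 : Int)).toNat = 24 from rfl,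
    show ((26 : Int)).toNat = 26 from rfl,
    show ((28 : Int)).toNat = 28 from rfl,
    show ((30 : Int)).toNat = 30 from rfl,
    show ((32 : Int)).toNat = 32 from rfl, List.drop_drop]
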